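-- pv_equiv track=rewrite | github.com/tiago2904santos/Central-de-Viagens-2.0 | cadastros/services_importacao.py | _resolve_columns_estado
-- ===== SOURCE A (Python) =====
-- import unicodedata
--
-- def _strip_accents(value: str) -> str:
--     normalized = unicodedata.normalize("NFD", value or "")
--     return "".join(ch for ch in normalized if unicodedata.category(ch) != "Mn")
--
-- def _classify_column_estado(header: str) -> str | None:
--     raw = (header or "").strip()
--     key = _strip_accents(raw.upper())
--     if key == "COD":
--         return "cod"
--     if key == "NOME":
--         return "nome"
--     if key == "SIGLA":
--         return "sigla"
--     return None
--
-- def _resolve_columns_estado(fieldnames: list[str] | None) -> dict[str, str]: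
--     out: dict[str, str] = {}
--     if not fieldnames:
--         return out
--     for fn in fieldnames:
--         kind = _classify_column_estado(fn)
--         if kind and kind not in out:
--             out[kind] = fn
--     return out
-- ===== SOURCE B (Python) =====
-- import unicodedata
--
--
-- def _strip_accents(value: str) -> str:
--     normalized = unicodedata.normalize("NFD", value or "")
--     return "".join(ch for ch in normalized if unicodedata.category(ch) != "Mn")
--
--
-- _KEY_BY_ROLE = (("cod", "COD"), ("nome", "NOME"), ("sigla", "SIGLA"))
--
--
-- def _resolve_columns_estado(fieldnames):
--     out = {}
--     if not fieldnames:
--         return out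
--     indexed = list(enumerate(fieldnames))
--     hits = []
--     for role, key in _KEY_BY_ROLE:
--         for i, fn in indexed:
--             if _strip_accents((fn or "").strip().upper()) == key:
--                 hits.append((i, role, fn))
--                 break
--     hits.sort(key=lambda h: h[0])
--     for _, role, fn in hits:
--         out[role] = fn
--     return out
-- ===== Notes on version B (the rewrite author's own statement) =====
-- stated objective: alternative
-- what changed: Instead of one header-order pass building the dict with a classifier if-chain and membership test, B works from the target side: for each role (cod/nome/sigla) it scans the enumerated headers for the first one whose normalized value equals that role's key, then sorts the hits by header index and builds the dict, reproducing A's header-order, first-match-wins result.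
import Mathlib
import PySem

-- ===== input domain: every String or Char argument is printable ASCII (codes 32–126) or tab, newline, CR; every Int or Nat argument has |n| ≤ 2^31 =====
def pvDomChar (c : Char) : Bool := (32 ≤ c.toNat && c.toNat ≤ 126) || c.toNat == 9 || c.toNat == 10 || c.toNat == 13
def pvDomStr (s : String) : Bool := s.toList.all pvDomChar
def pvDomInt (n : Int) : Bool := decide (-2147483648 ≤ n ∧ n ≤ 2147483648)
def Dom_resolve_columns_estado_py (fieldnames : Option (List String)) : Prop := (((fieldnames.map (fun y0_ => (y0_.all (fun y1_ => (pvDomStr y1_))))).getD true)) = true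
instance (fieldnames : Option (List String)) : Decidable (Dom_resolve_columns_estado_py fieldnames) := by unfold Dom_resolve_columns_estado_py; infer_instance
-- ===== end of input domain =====

-- B re-implements the resolver from the target side (per-role scan of the enumerated
-- headers + sort by header index) instead of A's single header-order pass; objective:
-- alternative decomposition, same cost.

-- ===== PORT A =====
-- _strip_accents: on the printable-ASCII domain (Dom_) unicodedata.normalize("NFD", ·)
-- is the identity and no character has category "Mn", so the filter keeps every
-- character; exact on Dom_. ('value or ""' is the identity on str.)
def pvStripAccents (cs : List Char) : List Char :=
  cs.filter (fun _ => true)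

def pvClassifyColumnEstado (header : String) : Option String :=
  let raw := PySem.Chars.strip header.toList
  let key := pvStripAccents (PySem.Chars.upper raw)
  if key = "COD".toList then some "cod"
  else if key = "NOME".toList then some "nome"
  else if key = "SIGLA".toList then some "sigla"
  else none

-- the body of A's 'for fn in fieldnames' loop
def pvStepA (out : PySem.Dict String String) (fn : String) : PySem.Dict String String :=
  match pvClassifyColumnEstado fn with
  | some kind => if out.contains kind then out else out.insert kind fn
  | none => out

def resolve_columns_estado_py (fieldnames : Option (List String)) : List (String × String) :=
  let out : PySem.Dict String String := PySem.Dict.empty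
  match fieldnames with
  | none => out.items
  | some fns =>
    if fns.isEmpty then out.items
    else (fns.foldl pvStepA out).items

-- ===== PORT B =====
def pvKeyByRole : List (String × List Char) :=
  [("cod", "COD".toList), ("nome", "NOME".toList), ("sigla", "SIGLA".toList)]

-- _strip_accents((fn or "").strip().upper()) as used in Source B's inner loop
def pvNormB (fn : String) : List Char :=
  pvStripAccents (PySem.Chars.upper (PySem.Chars.strip fn.toList))

-- Source B's inner 'for i, fn in indexed: … break' loop: first matching (index, header)
def pvFirstHit (indexed : List (Int × String)) (key : List Char) : Option (Int × String) :=
  match indexed with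
  | [] => none
  | (i, fn) :: t => if pvNormB fn = key then some (i, fn) else pvFirstHit t key

-- the body of Source B's outer 'for role, key in _KEY_BY_ROLE' loop
def pvAddHit (indexed : List (Int × String)) (hits : List (Int × String × String))
    (rk : String × List Char) : List (Int × String × String) :=
  match pvFirstHit indexed rk.2 with
  | some p => hits ++ [(p.1, rk.1, p.2)]
  | none => hits

-- the body of Source B's final 'for _, role, fn in hits' loop
def pvInsHit (out : PySem.Dict String String) (h : Int × String × String) :
    PySem.Dict String String :=
  out.insert h.2.1 h.2.2

def resolve_columns_estado_py_alt (fieldnames : Option (List String)) : List (String × String) :=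
  let out : PySem.Dict String String := PySem.Dict.empty
  match fieldnames with
  | none => out.items
  | some fns =>
    if fns.isEmpty then out.items
    else
      let indexed := PySem.List.enumerate fns 0
      let hits := pvKeyByRole.foldl (pvAddHit indexed) []
      let shits := PySem.List.sorted hits (fun h => h.1) false
      (shits.foldl pvInsHit out).items

-- ===== PRECONDITION & SPEC =====
def Spec_resolve_columns_estado_py (fieldnames : Option (List String)) (out : List (String × String)) : Prop := out = resolve_columns_estado_py_alt fieldnames
instance (fieldnames : Option (List String)) (out : List (String × String)) : Decidable (Spec_resolve_columns_estado_py fieldnames out) := by unfold Spec_resolve_columns_estado_py; infer_instance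

-- ===== CLAIM (what is proved, stated in full; the proofs are below) =====
def Claim_equal_resolve_columns_estado_py : Prop := ∀ (fieldnames : Option (List String)), Dom_resolve_columns_estado_py fieldnames → Spec_resolve_columns_estado_py fieldnames (resolve_columns_estado_py fieldnames)

-- ===== LEMMAS AND PROOFS =====

-- B's hits list, as a filterMap over the role table (proof-side view of the foldl)
def pvHitOf (fns : List String) (rk : String × List Char) : Option (Int × String × String) :=
  (pvFirstHit (PySem.List.enumerate fns 0) rk.2).map (fun p => (p.1, rk.1, p.2))

def pvHits (fns : List String) : List (Int × String × String) :=
  pvKeyByRole.filterMap (pvHitOf fns)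

theorem pvAddHit_foldl (indexed : List (Int × String)) (l : List (String × List Char))
    (acc : List (Int × String × String)) :
    l.foldl (pvAddHit indexed) acc
      = acc ++ l.filterMap (fun rk => (pvFirstHit indexed rk.2).map (fun p => (p.1, rk.1, p.2))) := by
  induction l generalizing acc with
  | nil => simp
  | cons rk t ih =>
    simp only [List.foldl_cons, List.filterMap_cons]
    cases h : pvFirstHit indexed rk.2 with
    | none => simp [pvAddHit, h, ih]
    | some p => simp [pvAddHit, h, ih]

theorem pvClassify_eq (fn : String) :
    pvClassifyColumnEstado fn =
      (if pvNormB fn = "COD".toList then some "cod"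
       else if pvNormB fn = "NOME".toList then some "nome"
       else if pvNormB fn = "SIGLA".toList then some "sigla"
       else none) := rfl

theorem pvFirstHit_append (e : List (Int × String)) (q : Int × String) (key : List Char) :
    pvFirstHit (e ++ [q]) key
      = (match pvFirstHit e key with
         | some p => some p
         | none => if pvNormB q.2 = key then some q else none) := by
  induction e with
  | nil => cases q; simp [pvFirstHit]
  | cons hd t ih =>
    obtain ⟨i, fn⟩ := hd
    by_cases h : pvNormB fn = key <;> simp [pvFirstHit, h, ih]

theorem pvFirstHit_some (e : List (Int × String)) (key : List Char) (p : Int × String)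
    (h : pvFirstHit e key = some p) : p ∈ e ∧ pvNormB p.2 = key := by
  induction e with
  | nil => simp [pvFirstHit] at h
  | cons hd t ih =>
    obtain ⟨i, fn⟩ := hd
    by_cases hn : pvNormB fn = key
    · simp [pvFirstHit, hn] at h
      subst h
      exact ⟨List.mem_cons_self, hn⟩
    · simp [pvFirstHit, hn] at h
      obtain ⟨hm, hk⟩ := ih h
      exact ⟨List.mem_cons_of_mem _ hm, hk⟩

theorem pvEnum_mem_inj (fns : List String) (p q : Int × String)
    (hp : p ∈ PySem.List.enumerate fns 0) (hq : q ∈ PySem.List.enumerate fns 0)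
    (hidx : p.1 = q.1) : p = q := by
  rw [PySem.List.mem_enumerate_iff] at hp hq
  obtain ⟨k, hk, rfl⟩ := hp
  obtain ⟨m, hm, rfl⟩ := hq
  have hkm : (k : Int) = (m : Int) := by simpa using hidx
  have hkm' : k = m := by exact_mod_cast hkm
  subst hkm'
  rfl

theorem pvEnum_mem_lt (fns : List String) (p : Int × String)
    (hp : p ∈ PySem.List.enumerate fns 0) : 0 ≤ p.1 ∧ p.1 < (fns.length : Int) := by
  rw [PySem.List.mem_enumerate_iff] at hp
  obtain ⟨k, hk, rfl⟩ := hp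
  simp
  omega

-- two role entries with different keys yield hits with different indices
theorem pvHit_idx_ne (fns : List String) (rk1 rk2 : String × List Char)
    (hne : rk1.2 ≠ rk2.2) (h1 h2 : Int × String × String)
    (e1 : pvHitOf fns rk1 = some h1) (e2 : pvHitOf fns rk2 = some h2) :
    h1.1 ≠ h2.1 := by
  unfold pvHitOf at e1 e2
  cases f1 : pvFirstHit (PySem.List.enumerate fns 0) rk1.2 with
  | none => simp [f1] at e1
  | some p1 =>
    cases f2 : pvFirstHit (PySem.List.enumerate fns 0) rk2.2 with
    | none => simp [f2] at e2
    | some p2 =>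
      simp [f1] at e1
      simp [f2] at e2
      obtain ⟨m1, n1⟩ := pvFirstHit_some _ _ _ f1
      obtain ⟨m2, n2⟩ := pvFirstHit_some _ _ _ f2
      intro hidx
      have hp : p1 = p2 := by
        apply pvEnum_mem_inj fns p1 p2 m1 m2
        rw [← e1, ← e2] at hidx
        simpa using hidx
      apply hne
      rw [← n1, ← n2, hp]

-- indices in B's hits list are pairwise distinct
theorem pvHits_pairwise_ne (fns : List String) :
    (pvHits fns).Pairwise (fun a b => a.1 ≠ b.1) := by
  unfold pvHits
  rw [List.pairwise_filterMap]
  have hkeys : pvKeyByRole.Pairwise (fun rk1 rk2 => rk1.2 ≠ rk2.2) := by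
    unfold pvKeyByRole; decide
  refine hkeys.imp_of_mem ?_
  intro rk1 rk2 _ _ hne h1 e1 h2 e2
  exact pvHit_idx_ne fns rk1 rk2 hne h1 h2 e1 e2

-- every hit's index is an index of the enumerated header list
theorem pvHits_mem_lt (fns : List String) (h : Int × String × String)
    (hm : h ∈ pvHits fns) : h.1 < (fns.length : Int) := by
  unfold pvHits at hm
  rw [List.mem_filterMap] at hm
  obtain ⟨rk, _, hrk⟩ := hm
  unfold pvHitOf at hrk
  cases f : pvFirstHit (PySem.List.enumerate fns 0) rk.2 with
  | none => simp [f] at hrk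
  | some p =>
    simp [f] at hrk
    obtain ⟨pm, _⟩ := pvFirstHit_some _ _ _ f
    have := pvEnum_mem_lt fns p pm
    rw [← hrk]
    simpa using this.2

-- roles in B's hits list are pairwise distinct
theorem pvHits_roles_pairwise_ne (fns : List String) :
    (pvHits fns).Pairwise (fun a b => a.2.1 ≠ b.2.1) := by
  unfold pvHits
  rw [List.pairwise_filterMap]
  have hroles : pvKeyByRole.Pairwise (fun rk1 rk2 => rk1.1 ≠ rk2.1) := by
    unfold pvKeyByRole; decide
  refine hroles.imp_of_mem ?_
  intro rk1 rk2 _ _ hne h1 e1 h2 e2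
  unfold pvHitOf at e1 e2
  cases f1 : pvFirstHit (PySem.List.enumerate fns 0) rk1.2 with
  | none => simp [f1] at e1
  | some p1 =>
    cases f2 : pvFirstHit (PySem.List.enumerate fns 0) rk2.2 with
    | none => simp [f2] at e2
    | some p2 =>
      simp [f1] at e1
      simp [f2] at e2
      rw [← e1, ← e2]
      simpa using hne

theorem pvEnum_append (fns : List String) (x : String) :
    PySem.List.enumerate (fns ++ [x]) 0
      = PySem.List.enumerate fns 0 ++ [((fns.length : Int), x)] := by
  rw [PySem.List.enumerate_append]
  simp [PySem.List.enumerate_cons, PySem.List.enumerate_nil]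

theorem pvHitOf_append_ne (fns : List String) (x : String) (rk : String × List Char)
    (hne : pvNormB x ≠ rk.2) : pvHitOf (fns ++ [x]) rk = pvHitOf fns rk := by
  unfold pvHitOf
  rw [pvEnum_append, pvFirstHit_append]
  cases h : pvFirstHit (PySem.List.enumerate fns 0) rk.2 with
  | none => simp [h, hne]
  | some p => simp [h]

theorem pvHitOf_append_some (fns : List String) (x : String) (rk : String × List Char)
    (p : Int × String) (h : pvFirstHit (PySem.List.enumerate fns 0) rk.2 = some p) :
    pvHitOf (fns ++ [x]) rk = pvHitOf fns rk := by
  unfold pvHitOf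
  rw [pvEnum_append, pvFirstHit_append]
  simp [h]

theorem pvHits_append_unchanged (fns : List String) (x : String)
    (h : ∀ rk ∈ pvKeyByRole, pvNormB x = rk.2 →
          (pvFirstHit (PySem.List.enumerate fns 0) rk.2).isSome) :
    pvHits (fns ++ [x]) = pvHits fns := by
  unfold pvHits
  apply List.filterMap_congr
  intro rk hrk
  by_cases hne : pvNormB x = rk.2
  · obtain ⟨p, hp⟩ := Option.isSome_iff_exists.mp (h rk hrk hne)
    exact pvHitOf_append_some fns x rk p hp
  · exact pvHitOf_append_ne fns x rk hne

theorem pvHits_append_perm (fns : List String) (x : String) (r : String) (keyr : List Char)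
    (l1 l2 : List (String × List Char))
    (hnorm : pvNormB x = keyr)
    (hnone : pvFirstHit (PySem.List.enumerate fns 0) keyr = none)
    (hsplit : pvKeyByRole = l1 ++ (r, keyr) :: l2)
    (hother : ∀ rk ∈ l1 ++ l2, rk.2 ≠ keyr) :
    (pvHits (fns ++ [x])).Perm (pvHits fns ++ [((fns.length : Int), r, x)]) := by
  have hl1 : l1.filterMap (pvHitOf (fns ++ [x])) = l1.filterMap (pvHitOf fns) := by
    apply List.filterMap_congr
    intro rk hrk
    exact pvHitOf_append_ne fns x rk
      (fun hEq => hother rk (by simp [hrk]) (by rw [← hEq, hnorm]))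
  have hl2 : l2.filterMap (pvHitOf (fns ++ [x])) = l2.filterMap (pvHitOf fns) := by
    apply List.filterMap_congr
    intro rk hrk
    exact pvHitOf_append_ne fns x rk
      (fun hEq => hother rk (by simp [hrk]) (by rw [← hEq, hnorm]))
  have h1 : pvHitOf (fns ++ [x]) (r, keyr) = some ((fns.length : Int), r, x) := by
    unfold pvHitOf
    rw [pvEnum_append, pvFirstHit_append]
    simp [hnone, hnorm]
  have h0 : pvHitOf fns (r, keyr) = none := by
    unfold pvHitOf
    simp [hnone]
  unfold pvHits
  rw [hsplit]
  simp only [List.filterMap_append, List.filterMap_cons, h1, h0, hl1, hl2]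
  exact List.perm_middle.trans (List.perm_append_singleton _ _).symm

-- the dict built by A's loop contains role r iff B's scan for r's key finds a header
theorem pvContains_iff (fns : List String) (r : String) (keyr : List Char)
    (hmem : (r, keyr) ∈ pvKeyByRole)
    (huniqr : ∀ rk ∈ pvKeyByRole, rk.1 = r → rk = (r, keyr))
    (hitems : (fns.foldl pvStepA PySem.Dict.empty).items
      = (PySem.List.sorted (pvHits fns) (fun h => h.1) false).map (fun h => (h.2.1, h.2.2))) :
    (fns.foldl pvStepA PySem.Dict.empty).contains r
      = (pvFirstHit (PySem.List.enumerate fns 0) keyr).isSome := by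
  have hkeys : (fns.foldl pvStepA PySem.Dict.empty).keys
      = (PySem.List.sorted (pvHits fns) (fun h => h.1) false).map (fun h => h.2.1) := by
    simp only [PySem.Dict.keys, hitems, List.map_map]
    rfl
  cases f : pvFirstHit (PySem.List.enumerate fns 0) keyr with
  | some p =>
    have hh : ((p.1, r, p.2) : Int × String × String) ∈ pvHits fns := by
      apply List.mem_filterMap.mpr
      exact ⟨(r, keyr), hmem, by unfold pvHitOf; rw [f]; rfl⟩
    have hmemkeys : r ∈ (fns.foldl pvStepA PySem.Dict.empty).keys := by
      rw [hkeys]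
      exact List.mem_map.mpr ⟨(p.1, r, p.2), (PySem.List.mem_sorted _ _ _ _).mpr hh, rfl⟩
    simp only [Option.isSome_some]
    exact (PySem.Dict.contains_iff_mem_keys _ _).mpr hmemkeys
  | none =>
    simp only [Option.isSome_none]
    by_contra hne
    have hct : (fns.foldl pvStepA PySem.Dict.empty).contains r = true := by
      cases hcb : (fns.foldl pvStepA PySem.Dict.empty).contains r
      · exact absurd (hcb.trans rfl) (by simpa using hne)
      · rfl
    have hmemkeys := (PySem.Dict.contains_iff_mem_keys _ _).mp hct
    rw [hkeys] at hmemkeys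
    obtain ⟨h0, hh0, hr0⟩ := List.mem_map.mp hmemkeys
    have hh0' : h0 ∈ pvHits fns := (PySem.List.mem_sorted _ _ _ _).mp hh0
    obtain ⟨rk, hrk, hrkh⟩ := List.mem_filterMap.mp hh0'
    have hrole : rk.1 = r := by
      unfold pvHitOf at hrkh
      cases ff : pvFirstHit (PySem.List.enumerate fns 0) rk.2 with
      | none => rw [ff] at hrkh; simp at hrkh
      | some q =>
        rw [ff] at hrkh
        simp at hrkh
        rw [← hr0, ← hrkh]
    have hrk' : rk = (r, keyr) := huniqr rk hrk hrole
    rw [hrk'] at hrkh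
    unfold pvHitOf at hrkh
    rw [f] at hrkh
    simp at hrkh

theorem pvStepCase (fns : List String) (x : String) (r : String) (keyr : List Char)
    (l1 l2 : List (String × List Char))
    (hnorm : pvNormB x = keyr)
    (hcl : pvClassifyColumnEstado x = some r)
    (huniqr : ∀ rk ∈ pvKeyByRole, rk.1 = r → rk = (r, keyr))
    (hsplit : pvKeyByRole = l1 ++ (r, keyr) :: l2)
    (hother : ∀ rk ∈ l1 ++ l2, rk.2 ≠ keyr)
    (ih : (fns.foldl pvStepA PySem.Dict.empty).items
      = (PySem.List.sorted (pvHits fns) (fun h => h.1) false).map (fun h => (h.2.1, h.2.2))) :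
    ((fns ++ [x]).foldl pvStepA PySem.Dict.empty).items
      = (PySem.List.sorted (pvHits (fns ++ [x])) (fun h => h.1) false).map (fun h => (h.2.1, h.2.2)) := by
  have hmem : (r, keyr) ∈ pvKeyByRole := by rw [hsplit]; simp
  have hcont := pvContains_iff fns r keyr hmem huniqr ih
  rw [List.foldl_append]
  simp only [List.foldl_cons, List.foldl_nil]
  cases f : pvFirstHit (PySem.List.enumerate fns 0) keyr with
  | some p =>
    rw [f] at hcont
    simp only [Option.isSome_some] at hcont
    have hstep : pvStepA (fns.foldl pvStepA PySem.Dict.empty) x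
        = fns.foldl pvStepA PySem.Dict.empty := by
      simp [pvStepA, hcl, hcont]
    rw [hstep, pvHits_append_unchanged fns x ?_]
    · exact ih
    · intro rk _ hn
      have hk : rk.2 = keyr := by rw [← hn, hnorm]
      rw [hk, f]
      simp
  | none =>
    rw [f] at hcont
    simp only [Option.isSome_none] at hcont
    have hstep : pvStepA (fns.foldl pvStepA PySem.Dict.empty) x
        = (fns.foldl pvStepA PySem.Dict.empty).insert r x := by
      simp [pvStepA, hcl, hcont]
    rw [hstep, PySem.Dict.items_insert_of_not_contains _ _ hcont, ih]
    have hperm := pvHits_append_perm fns x r keyr l1 l2 hnorm f hsplit hother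
    have hsort : PySem.List.sorted (pvHits (fns ++ [x])) (fun h => h.1) false
        = PySem.List.sorted (pvHits fns) (fun h => h.1) false ++ [((fns.length : Int), r, x)] := by
      apply PySem.List.sorted_eq_of_perm_of_pairwise_lt
      · exact (((PySem.List.sorted_perm (pvHits fns) (fun h => h.1) false).append_right _).trans hperm.symm)
      · rw [List.pairwise_append]
        refine ⟨?_, by simp, ?_⟩
        · have hle := PySem.List.sorted_pairwise (pvHits fns) (fun h => h.1)
          have hne' : (PySem.List.sorted (pvHits fns) (fun h => h.1) false).Pairwise
              (fun a b => a.1 ≠ b.1) := by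
            exact (List.Perm.pairwise_iff (fun hxy => Ne.symm hxy)
              (PySem.List.sorted_perm (pvHits fns) (fun h => h.1) false)).mpr
              (pvHits_pairwise_ne fns)
          exact (hle.and hne').imp (fun h => lt_of_le_of_ne h.1 h.2)
        · intro a ha b hb
          simp only [List.mem_singleton] at hb
          subst hb
          have hm : a ∈ pvHits fns := (PySem.List.mem_sorted _ _ _ _).mp ha
          exact pvHits_mem_lt fns a hm
    rw [hsort, List.map_append]
    rfl

-- the master invariant: A's dict items are B's hits sorted by header index
theorem pvMaster (fns : List String) :
    (fns.foldl pvStepA PySem.Dict.empty).items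
      = (PySem.List.sorted (pvHits fns) (fun h => h.1) false).map (fun h => (h.2.1, h.2.2)) := by
  induction fns using List.reverseRecOn with
  | nil => rfl
  | append_singleton fns x ih =>
    rcases hc : pvClassifyColumnEstado x with _ | r
    · have hnomatch : ∀ rk ∈ pvKeyByRole, pvNormB x ≠ rk.2 := by
        have hcl' := pvClassify_eq x
        rw [hc] at hcl'
        by_cases c1 : pvNormB x = "COD".toList
        · simp [c1] at hcl'
        · by_cases c2 : pvNormB x = "NOME".toList
          · simp [c2] at hcl'
          · by_cases c3 : pvNormB x = "SIGLA".toList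
            · simp [c3] at hcl'
            · intro rk hrk
              simp only [pvKeyByRole, List.mem_cons, List.not_mem_nil, or_false] at hrk
              rcases hrk with rfl | rfl | rfl
              · exact c1
              · exact c2
              · exact c3
      rw [pvHits_append_unchanged fns x (fun rk hrk hk => absurd hk (hnomatch rk hrk)),
          List.foldl_append]
      simpa [List.foldl_cons, List.foldl_nil, pvStepA, hc] using ih
    · have hcl' := pvClassify_eq x
      rw [hc] at hcl'
      split_ifs at hcl' with c1 c2 c3
      · have hr : r = "cod" := by simpa using hcl'
        subst hr
        exact pvStepCase fns x "cod" ("COD".toList) [] [("nome", "NOME".toList), ("sigla", "SIGLA".toList)] c1 hc (by decide) (by decide) (by decide) ih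
      · have hr : r = "nome" := by simpa using hcl'
        subst hr
        exact pvStepCase fns x "nome" ("NOME".toList) [("cod", "COD".toList)] [("sigla", "SIGLA".toList)] c2 hc (by decide) (by decide) (by decide) ih
      · have hr : r = "sigla" := by simpa using hcl'
        subst hr
        exact pvStepCase fns x "sigla" ("SIGLA".toList) [("cod", "COD".toList), ("nome", "NOME".toList)] [] c3 hc (by decide) (by decide) (by decide) ih

theorem resolve_columns_estado_py_spec : Claim_equal_resolve_columns_estado_py := by
  intro fieldnames _
  unfold Spec_resolve_columns_estado_py resolve_columns_estado_py resolve_columns_estado_py_alt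
  cases fieldnames with
  | none => rfl
  | some fns =>
    by_cases h : fns.isEmpty
    · simp [h]
    · simp only [h, Bool.false_eq_true, if_false]
      rw [pvAddHit_foldl, List.nil_append]
      have hfm : (pvKeyByRole.filterMap fun rk =>
          (pvFirstHit (PySem.List.enumerate fns 0) rk.2).map (fun p => (p.1, rk.1, p.2)))
          = pvHits fns := rfl
      rw [hfm, pvMaster fns]
      have hpw := (List.Perm.pairwise_iff (fun hxy => Ne.symm hxy)
        (PySem.List.sorted_perm (pvHits fns) (fun h => h.1) false)).mpr
        (pvHits_roles_pairwise_ne fns)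
      have hnodup : ((PySem.List.sorted (pvHits fns) (fun h => h.1) false).map
          (fun a : Int × String × String => a.2.1)).Nodup := List.pairwise_map.mpr hpw
      have hfresh : ∀ a ∈ PySem.List.sorted (pvHits fns) (fun h => h.1) false,
          (PySem.Dict.empty : PySem.Dict String String).contains
            ((fun a : Int × String × String => a.2.1) a) = false := by
        intro a _
        simp [pysem]
      have hitems := PySem.Dict.items_foldl_insert_fresh
        (PySem.List.sorted (pvHits fns) (fun h => h.1) false)
        (fun a : Int × String × String => a.2.1) (fun a : Int × String × String => a.2.2)
        PySem.Dict.empty hfresh hnodup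
      have hfold : List.foldl pvInsHit (PySem.Dict.empty : PySem.Dict String String)
          (PySem.List.sorted (pvHits fns) (fun h => h.1) false)
          = List.foldl (fun (d : PySem.Dict String String) (a : Int × String × String) =>
              d.insert ((fun a : Int × String × String => a.2.1) a)
                ((fun a : Int × String × String => a.2.2) a)) PySem.Dict.empty
            (PySem.List.sorted (pvHits fns) (fun h => h.1) false) := rfl
      rw [hfold, hitems]
      simp [PySem.Dict.empty]
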